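-- pv_equiv track=rewrite | github.com/openakita/openakita | tests/unit/test_policy_v2_c8b4_confirmation_mode.py | _strip_comments_and_doc
-- ===== SOURCE A (Python) =====
-- def _strip_comments_and_doc(text: str) -> str:
--     out: list[str] = []
--     in_doc = False
--     for raw in text.splitlines():
--         triple_count = raw.count('"""') + raw.count("'''")
--         if triple_count % 2 == 1:
--             in_doc = not in_doc
--             continue
--         if triple_count >= 2 and not in_doc:
--             continue
--         if in_doc:
--             continue
--         if raw.lstrip().startswith("#"):
--             continue
--         out.append(raw)
--     return "\n".join(out)
-- ===== SOURCE B (Python) =====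
-- def _strip_comments_and_doc(text: str) -> str:
--     # Block decomposition: lines with an odd triple-quote count are delimiters.
--     # Split the line list into blocks at those delimiters (delimiters dropped);
--     # even-indexed blocks lie outside docstrings and contribute their quote-free,
--     # non-comment lines; odd-indexed blocks are docstring bodies and are dropped.
--     blocks = []
--     cur = []
--     for raw in text.splitlines():
--         if (raw.count('"""') + raw.count("'''")) % 2 == 1:
--             blocks.append(cur)
--             cur = []
--         else:
--             cur.append(raw)
--     blocks.append(cur)
--     out = []
--     for i, blk in enumerate(blocks):
--         if i % 2 == 0:
--             out.extend(l for l in blk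
--                        if (l.count('"""') + l.count("'''")) == 0
--                        and not l.lstrip().startswith("#"))
--     return "\n".join(out)
-- ===== Notes on version B (the rewrite author's own statement) =====
-- stated objective: alternative
-- what changed: Replaced A's single loop with a mutable in_doc flag by a delimiter-split decomposition: lines with an odd triple-quote count split the line list into blocks, odd-indexed blocks (docstring bodies) are dropped wholesale, and even-indexed blocks are filtered for quote-free non-comment lines.
import Mathlib
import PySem

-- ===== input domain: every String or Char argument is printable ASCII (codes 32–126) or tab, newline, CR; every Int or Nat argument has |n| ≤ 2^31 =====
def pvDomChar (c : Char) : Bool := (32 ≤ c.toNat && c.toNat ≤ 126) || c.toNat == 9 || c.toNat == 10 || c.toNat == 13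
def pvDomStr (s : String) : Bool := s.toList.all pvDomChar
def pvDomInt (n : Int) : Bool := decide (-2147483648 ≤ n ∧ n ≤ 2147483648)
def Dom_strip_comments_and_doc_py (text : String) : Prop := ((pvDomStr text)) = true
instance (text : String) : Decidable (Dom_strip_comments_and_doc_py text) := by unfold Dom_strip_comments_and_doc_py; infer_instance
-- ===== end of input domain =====

-- B replaces A's flag-toggling loop by splitting the lines into blocks at odd-triple-quote
-- delimiter lines and keeping only the filtered even-indexed blocks (alternative decomposition, same cost).

-- ===== PORT A =====
-- raw.count('"""') + raw.count("'''")
def pvCnt (raw : String) : Nat := PySem.Str.count raw "\"\"\"" + PySem.Str.count raw "'''"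

-- raw.lstrip().startswith("#")
def pvIsComment (raw : String) : Bool := PySem.Str.startswith (PySem.Str.lstrip raw) "#"

def strip_comments_and_doc_py (text : String) : String :=
  let st := (PySem.Str.splitlines text).foldl (fun (st : List String × Bool) raw =>
    let c := pvCnt raw
    if c % 2 == 1 then (st.1, !st.2)
    else if c ≥ 2 && !st.2 then st
    else if st.2 then st
    else if pvIsComment raw then st
    else (st.1 ++ [raw], st.2)) ([], false)
  PySem.Str.join "\n" st.1

-- ===== PORT B =====
-- l.count('"""') + l.count("'''") == 0 and not l.lstrip().startswith('#')
def pvGood (l : String) : Bool := pvCnt l == 0 && !pvIsComment l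

def strip_comments_and_doc_py_alt (text : String) : String :=
  let st := (PySem.Str.splitlines text).foldl
    (fun (st : List (List String) × List String) raw =>
      if pvCnt raw % 2 == 1 then (st.1 ++ [st.2], [])
      else (st.1, st.2 ++ [raw])) ([], [])
  let blocks := st.1 ++ [st.2]
  let out := (PySem.List.enumerate blocks).foldl
    (fun (out : List String) p =>
      if p.1 % 2 == 0 then out ++ p.2.filter pvGood else out) []
  PySem.Str.join "\n" out

-- ===== PRECONDITION & SPEC =====
def Spec_strip_comments_and_doc_py (text : String) (out : String) : Prop := out = strip_comments_and_doc_py_alt text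
instance (text : String) (out : String) : Decidable (Spec_strip_comments_and_doc_py text out) := by unfold Spec_strip_comments_and_doc_py; infer_instance

-- ===== CLAIM (what is proved, stated in full; the proofs are below) =====
def Claim_equal_strip_comments_and_doc_py : Prop := ∀ (text : String), Dom_strip_comments_and_doc_py text → Spec_strip_comments_and_doc_py text (strip_comments_and_doc_py text)

-- ===== LEMMAS AND PROOFS =====

-- lines A keeps, starting in docstring-state d
def pvKept (ls : List String) (d : Bool) : List String :=
  match ls with
  | [] => []
  | l :: ls =>
    let c := pvCnt l
    if c % 2 == 1 then pvKept ls (!d)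
    else if c ≥ 2 && !d then pvKept ls d
    else if d then pvKept ls d
    else if pvIsComment l then pvKept ls d
    else l :: pvKept ls d

theorem pvA_fold (ls : List String) (d : Bool) (out : List String) :
    (ls.foldl (fun (st : List String × Bool) raw =>
      let c := pvCnt raw
      if c % 2 == 1 then (st.1, !st.2)
      else if c ≥ 2 && !st.2 then st
      else if st.2 then st
      else if pvIsComment raw then st
      else (st.1 ++ [raw], st.2)) (out, d)).1 = out ++ pvKept ls d := by
  induction ls generalizing d out with
  | nil => simp [pvKept]
  | cons l ls ih =>
    simp only [List.foldl_cons, pvKept]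
    split_ifs with h1 h2 h3 h4 <;> rw [ih] <;> simp [h1, h2, h3, h4]

-- B's block split: (first block, remaining blocks)
def pvBlocks (ls : List String) : List String × List (List String) :=
  match ls with
  | [] => ([], [])
  | l :: ls =>
    let p := pvBlocks ls
    if pvCnt l % 2 == 1 then ([], p.1 :: p.2)
    else (l :: p.1, p.2)

theorem pvB_split_fold (ls : List String) (acc : List (List String)) (cur : List String) :
    (ls.foldl (fun (st : List (List String) × List String) raw =>
        if pvCnt raw % 2 == 1 then (st.1 ++ [st.2], [])
        else (st.1, st.2 ++ [raw])) (acc, cur)).1 ++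
    [(ls.foldl (fun (st : List (List String) × List String) raw =>
        if pvCnt raw % 2 == 1 then (st.1 ++ [st.2], [])
        else (st.1, st.2 ++ [raw])) (acc, cur)).2] =
    acc ++ (cur ++ (pvBlocks ls).1) :: (pvBlocks ls).2 := by
  induction ls generalizing acc cur with
  | nil => simp [pvBlocks]
  | cons l ls ih =>
    by_cases h1 : (pvCnt l % 2 == 1) = true
    · simp only [List.foldl_cons, if_pos h1, pvBlocks]
      rw [ih]; simp [h1]
    · simp only [List.foldl_cons, if_neg h1, pvBlocks]
      rw [ih]; simp [h1]

-- keep = true: current block is even-indexed (outside docstrings)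
def pvAlt (keep : Bool) (bs : List (List String)) : List String :=
  match bs with
  | [] => []
  | b :: bs => (if keep then b.filter pvGood else []) ++ pvAlt (!keep) bs

theorem pvB_sel_fold (bs : List (List String)) (i : Int) (out : List String)
    (hi : 0 ≤ i) :
    (PySem.List.enumerate bs i).foldl (fun (out : List String) p =>
      if p.1 % 2 == 0 then out ++ p.2.filter pvGood else out) out =
    out ++ pvAlt (i % 2 == 0) bs := by
  induction bs generalizing i out with
  | nil => simp [pvAlt, PySem.List.enumerate_nil]
  | cons b bs ih =>
    rw [PySem.List.enumerate_cons]
    simp only [List.foldl_cons, pvAlt]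
    have h2 : ((i + 1) % 2 == 0) = !(i % 2 == 0) := by
      rcases Int.emod_two_eq_zero_or_one i with h | h <;>
        simp [h, Int.add_mul_emod_self_left, Int.emod_emod_of_dvd] <;> omega
    by_cases h : i % 2 == 0
    · simp only [h, if_pos rfl]
      rw [ih _ _ (by omega), h2, h]
      simp
    · simp only [h]
      rw [if_neg (by simpa using h), ih _ _ (by omega), h2]
      simp [h]

theorem pvKept_eq_alt (ls : List String) (d : Bool) :
    pvKept ls d = pvAlt (!d) ((pvBlocks ls).1 :: (pvBlocks ls).2) := by
  induction ls generalizing d with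
  | nil => simp [pvKept, pvBlocks, pvAlt]
  | cons l ls ih =>
    simp only [pvKept, pvBlocks]
    by_cases h1 : (pvCnt l % 2 == 1) = true
    · simp only [h1, if_pos rfl]
      rw [ih (!d)]
      cases d <;> simp [pvAlt]
    · have h1' : pvCnt l % 2 ≠ 1 := by simpa using h1
      have hodd : ¬ (pvCnt l % 2 == 1) = true := h1
      cases d with
      | true =>
        simp only [hodd, if_neg, Bool.and_false]
        rw [ih true]
        simp [pvAlt, hodd]
      | false =>
        by_cases h2 : pvCnt l ≥ 2
        · have hg : pvGood l = false := by
            simp [pvGood, pvCnt] at *; omega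
          simp [hodd, h2, ih false, pvAlt, hg]
        · have hc0 : pvCnt l = 0 := by omega
          by_cases h3 : pvIsComment l = true
          · have hg : pvGood l = false := by simp [pvGood, h3]
            simp [hodd, h2, h3, ih false, pvAlt, hg]
          · have hg : pvGood l = true := by
              simp [pvGood, hc0, h3]
            simp [hodd, h2, h3, ih false, pvAlt, hg]

-- ===== VERDICT (by name: the statement is the Claim_ definition above) =====
theorem strip_comments_and_doc_py_spec : Claim_equal_strip_comments_and_doc_py := by
  intro text _
  show _ = _
  unfold strip_comments_and_doc_py strip_comments_and_doc_py_alt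
  simp only [pvA_fold, List.nil_append]
  rw [pvKept_eq_alt]
  congr 1
  have hs := pvB_split_fold (PySem.Str.splitlines text) [] []
  simp only [List.nil_append] at hs
  have he := pvB_sel_fold ((pvBlocks (PySem.Str.splitlines text)).1 :: (pvBlocks (PySem.Str.splitlines text)).2) 0 [] (by omega)
  simp only [List.nil_append] at he
  simp only [hs, he]
  rfl
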